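-- pv_equiv track=rewrite | github.com/trungnguyencs/Leetcode | 2560-house-robber-iv/2560-house-robber-iv.py | canGetKHouses
-- ===== SOURCE A (Python) =====
-- def canGetKHouses(nums, k, maxCap):
--     i = 0
--     houses = 0
--     while i < len(nums):
--         if nums[i] <= maxCap:
--             houses += 1
--             i += 2
--             if houses >= k: return True
--         else:
--             i += 1
--     return False
-- ===== SOURCE B (Python) =====
-- def canGetKHouses(nums, k, maxCap):
--     # House-robber DP: best non-adjacent count of affordable houses over each prefix.
--     prev2 = prev1 = 0
--     for v in nums:
--         cur = max(prev1, prev2 + (1 if v <= maxCap else 0))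
--         prev2, prev1 = prev1, cur
--     return prev1 >= k
-- ===== Notes on version B (the rewrite author's own statement) =====
-- stated objective: alternative
-- what changed: Replaces A's greedy index-jumping scan with early return by a house-robber dynamic program dp[i]=max(dp[i-1],dp[i-2]+affordable(i)) that computes the maximum number of non-adjacent affordable houses and compares it with k.
-- intended difference: When k <= 0 and no element of nums is <= maxCap, A returns False because its success check only runs after a pick, while B returns True, the intended value since choosing zero houses already satisfies a non-positive k. — e.g. on canGetKHouses([5], 0, 3): A returns false, B returns true
import Mathlib
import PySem

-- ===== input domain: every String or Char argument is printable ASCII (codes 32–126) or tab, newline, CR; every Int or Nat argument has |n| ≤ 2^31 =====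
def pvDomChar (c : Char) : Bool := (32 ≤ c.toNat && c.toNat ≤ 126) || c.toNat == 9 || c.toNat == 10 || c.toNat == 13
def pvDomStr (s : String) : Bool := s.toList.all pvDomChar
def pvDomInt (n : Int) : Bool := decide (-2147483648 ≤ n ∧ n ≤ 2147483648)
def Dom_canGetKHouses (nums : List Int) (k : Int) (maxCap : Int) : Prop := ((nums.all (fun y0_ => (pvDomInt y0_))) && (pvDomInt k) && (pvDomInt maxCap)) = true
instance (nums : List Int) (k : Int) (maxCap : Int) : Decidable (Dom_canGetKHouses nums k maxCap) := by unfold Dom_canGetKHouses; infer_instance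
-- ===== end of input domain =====

-- B replaces A's greedy early-return scan by a house-robber DP computing the max non-adjacent affordable count; equal outside D_ (k ≤ 0 with no affordable house), where B's True is the intended value.


-- ===== PORT A =====
-- A's while loop: state (i, houses); i jumps by 2 on a pick, by 1 otherwise; early True
def aLoop (nums : List Int) (k maxCap : Int) (i : Nat) (houses : Int) : Bool :=
  if h : i < nums.length then
    if nums[i] ≤ maxCap then
      if houses + 1 ≥ k then true
      else aLoop nums k maxCap (i + 2) (houses + 1)
    else aLoop nums k maxCap (i + 1) houses
  else false
termination_by nums.length - i

def canGetKHouses (nums : List Int) (k : Int) (maxCap : Int) : Bool :=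
  aLoop nums k maxCap 0 0

-- ===== PORT B =====
-- B's for loop: house-robber DP with the two rolling accumulators (prev2, prev1)
def bLoop (maxCap : Int) : List Int → Int → Int → Int
  | [], _, p1 => p1
  | v :: rest, p2, p1 => bLoop maxCap rest p1 (max p1 (p2 + (if v ≤ maxCap then 1 else 0)))

def canGetKHouses_alt (nums : List Int) (k : Int) (maxCap : Int) : Bool :=
  decide (bLoop maxCap nums 0 0 ≥ k)

-- ===== PRECONDITION & SPEC =====
-- When k ≤ 0 and no element of nums is ≤ maxCap, A returns False (its success check only runs
-- after a pick), while B returns True — the intended value, since zero houses satisfy k ≤ 0.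
def D_canGetKHouses (nums : List Int) (k : Int) (maxCap : Int) : Prop :=
  k ≤ 0 ∧ ∀ v ∈ nums, maxCap < v
instance (nums : List Int) (k : Int) (maxCap : Int) : Decidable (D_canGetKHouses nums k maxCap) := by unfold D_canGetKHouses; infer_instance

def Spec_canGetKHouses (nums : List Int) (k : Int) (maxCap : Int) (out : Bool) : Prop := ¬ D_canGetKHouses nums k maxCap → out = canGetKHouses_alt nums k maxCap
instance (nums : List Int) (k : Int) (maxCap : Int) (out : Bool) : Decidable (Spec_canGetKHouses nums k maxCap out) := by unfold Spec_canGetKHouses; infer_instance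

def pvDiffWitness_canGetKHouses : List Int × Int × Int := ([5], 0, 3)
def pvDiffWitnessOut_canGetKHouses : Bool × Bool := (false, true)

-- ===== CLAIM (what is proved, stated in full; the proofs are below) =====
def Claim_unchanged_canGetKHouses : Prop := ∀ (nums : List Int) (k : Int) (maxCap : Int), Dom_canGetKHouses nums k maxCap → Spec_canGetKHouses nums k maxCap (canGetKHouses nums k maxCap)
def Claim_changed_canGetKHouses : Prop := Dom_canGetKHouses (pvDiffWitness_canGetKHouses.1) (pvDiffWitness_canGetKHouses.2.1) (pvDiffWitness_canGetKHouses.2.2) ∧ D_canGetKHouses (pvDiffWitness_canGetKHouses.1) (pvDiffWitness_canGetKHouses.2.1) (pvDiffWitness_canGetKHouses.2.2) ∧ canGetKHouses (pvDiffWitness_canGetKHouses.1) (pvDiffWitness_canGetKHouses.2.1) (pvDiffWitness_canGetKHouses.2.2) = pvDiffWitnessOut_canGetKHouses.1 ∧ canGetKHouses_alt (pvDiffWitness_canGetKHouses.1) (pvDiffWitness_canGetKHouses.2.1) (pvDiffWitness_canGetKHouses.2.2) = pvDiffWitnessOut_canGetKHouses.2 ∧ pvDiffWitnessOut_canGetKHouses.1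 ≠ pvDiffWitnessOut_canGetKHouses.2
def Claim_exact_canGetKHouses : Prop := ∀ (nums : List Int) (k : Int) (maxCap : Int), Dom_canGetKHouses nums k maxCap → D_canGetKHouses nums k maxCap → canGetKHouses nums k maxCap ≠ canGetKHouses_alt nums k maxCap

-- ===== LEMMAS AND PROOFS =====

-- the greedy pick count over a suffix (characterises A's loop)
def gCount (maxCap : Int) : List Int → Int
  | [] => 0
  | v :: rest => if v ≤ maxCap then 1 + gCount maxCap (rest.drop 1) else gCount maxCap rest
termination_by l => l.length
decreasing_by all_goals (simp; try omega)

-- the maximum non-adjacent affordable count (characterises B's DP)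
def mBest (maxCap : Int) : List Int → Int
  | [] => 0
  | v :: rest => max (mBest maxCap rest) ((if v ≤ maxCap then 1 else 0) + mBest maxCap (rest.drop 1))
termination_by l => l.length
decreasing_by all_goals (simp; try omega)

theorem mBest_nonneg (maxCap : Int) (l : List Int) : 0 ≤ mBest maxCap l := by
  induction hn : l.length using Nat.strong_induction_on generalizing l with
  | _ n ih =>
  match l with
  | [] => simp [mBest]
  | v :: rest =>
    rw [mBest]
    have := ih rest.length (by simp at hn; omega) rest rfl
    omega

theorem mBest_tail_le (maxCap : Int) (l : List Int) : mBest maxCap (l.drop 1) ≤ mBest maxCap l := by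
  match l with
  | [] => simp
  | v :: rest =>
    simp only [List.drop_succ_cons, List.drop_zero]
    rw [mBest]; omega

theorem gCount_eq_mBest (maxCap : Int) (l : List Int) : gCount maxCap l = mBest maxCap l := by
  induction hn : l.length using Nat.strong_induction_on generalizing l with
  | _ n ih =>
  match l with
  | [] => simp [gCount, mBest]
  | v :: rest =>
    rw [gCount, mBest]
    have h1 : gCount maxCap (rest.drop 1) = mBest maxCap (rest.drop 1) := by
      apply ih (rest.drop 1).length _ _ rfl
      simp at hn ⊢; omega
    have h2 : gCount maxCap rest = mBest maxCap rest := by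
      apply ih rest.length _ _ rfl; simp at hn; omega
    have h3 := mBest_tail_le maxCap rest
    by_cases hv : v ≤ maxCap
    · -- max (mBest rest) (1 + mBest (drop 1 rest)) = 1 + mBest (drop 1 rest)
      have h4 : mBest maxCap rest ≤ 1 + mBest maxCap (rest.drop 1) := by
        match rest with
        | [] => simp [mBest]
        | w :: rest2 =>
          simp only [List.drop_succ_cons, List.drop_zero]
          rw [mBest]
          have := mBest_tail_le maxCap rest2
          split <;> omega
      rw [if_pos hv, if_pos hv, h1]; omega
    · rw [if_neg hv, if_neg hv, h2]; omega

theorem bLoop_eq (maxCap : Int) (l : List Int) (p2 p1 : Int) (h : p2 ≤ p1) :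
    bLoop maxCap l p2 p1 = max (p2 + mBest maxCap l) (p1 + mBest maxCap (l.drop 1)) := by
  induction l generalizing p2 p1 with
  | nil => simp [bLoop, mBest]; omega
  | cons v rest ih =>
    rw [bLoop, ih p1 _ (by omega), mBest]
    have h3 := mBest_tail_le maxCap rest
    simp only [List.drop_succ_cons, List.drop_zero]
    split <;> omega

-- A's loop returns True iff the remaining greedy count is ≥ 1 and reaches k
theorem aLoop_eq (nums : List Int) (k maxCap : Int) (i : Nat) (houses : Int) :
    aLoop nums k maxCap i houses
      = decide (1 ≤ gCount maxCap (nums.drop i) ∧ k ≤ houses + gCount maxCap (nums.drop i)) := by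
  induction hn : nums.length - i using Nat.strong_induction_on generalizing i houses with
  | _ n ih =>
  by_cases h : i < nums.length
  · have hdrop : nums.drop i = nums[i] :: nums.drop (i + 1) := List.drop_eq_getElem_cons h
    rw [aLoop, dif_pos h, hdrop, gCount]
    have hdd : (nums.drop (i + 1)).drop 1 = nums.drop (i + 2) := by rw [List.drop_drop]
    by_cases hv : nums[i] ≤ maxCap
    · rw [if_pos hv, if_pos hv, hdd]
      have hg2 : 0 ≤ gCount maxCap (nums.drop (i + 2)) := by
        rw [gCount_eq_mBest]; exact mBest_nonneg _ _
      by_cases hk : houses + 1 ≥ k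
      · rw [if_pos hk]
        symm; rw [decide_eq_true_iff]; omega
      · rw [if_neg hk, ih (nums.length - (i + 2)) (by omega) (i + 2) (houses + 1) rfl]
        rw [decide_eq_decide]; omega
    · rw [if_neg hv, if_neg hv,
        ih (nums.length - (i + 1)) (by omega) (i + 1) houses rfl]
  · have hd : nums.drop i = [] := List.drop_eq_nil_of_le (by omega)
    rw [aLoop, dif_neg h, hd, gCount]
    symm; rw [decide_eq_false_iff_not]; omega

theorem gCount_pos_of_mem (maxCap : Int) (l : List Int) (hx : ∃ v ∈ l, v ≤ maxCap) :
    1 ≤ gCount maxCap l := by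
  induction hn : l.length using Nat.strong_induction_on generalizing l with
  | _ n ih =>
  match l with
  | [] => simp at hx
  | v :: rest =>
    rw [gCount]
    by_cases hv : v ≤ maxCap
    · rw [if_pos hv]
      have : 0 ≤ gCount maxCap (rest.drop 1) := by
        rw [gCount_eq_mBest]; exact mBest_nonneg _ _
      omega
    · rw [if_neg hv]
      apply ih rest.length (by simp at hn; omega) rest _ rfl
      rcases hx with ⟨w, hw, hwle⟩
      rcases List.mem_cons.mp hw with h | h
      · exact absurd (h ▸ hwle) hv
      · exact ⟨w, h, hwle⟩

theorem gCount_eq_zero (maxCap : Int) (l : List Int) (hx : ∀ v ∈ l, maxCap < v) :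
    gCount maxCap l = 0 := by
  induction l with
  | nil => simp [gCount]
  | cons v rest ih =>
    rw [gCount, if_neg (by have := hx v (by simp); omega)]
    exact ih (fun w hw => hx w (List.mem_cons_of_mem _ hw))

theorem alt_eq (nums : List Int) (k maxCap : Int) :
    canGetKHouses_alt nums k maxCap = decide (k ≤ gCount maxCap nums) := by
  unfold canGetKHouses_alt
  rw [bLoop_eq maxCap nums 0 0 (le_refl 0), gCount_eq_mBest, decide_eq_decide]
  have := mBest_tail_le maxCap nums
  omega

theorem a_eq (nums : List Int) (k maxCap : Int) :
    canGetKHouses nums k maxCap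
      = decide (1 ≤ gCount maxCap nums ∧ k ≤ gCount maxCap nums) := by
  unfold canGetKHouses
  rw [aLoop_eq]; simp

-- ===== VERDICT (by name: the statements are the Claim_ definitions above) =====
theorem canGetKHouses_spec : Claim_unchanged_canGetKHouses := by
  intro nums k maxCap _ hnd
  rw [a_eq, alt_eq, decide_eq_decide]
  unfold D_canGetKHouses at hnd
  push Not at hnd
  by_cases hk : 1 ≤ k
  · omega
  · have ⟨v, hv, hvle⟩ := hnd (by omega)
    have := gCount_pos_of_mem maxCap nums ⟨v, hv, hvle⟩
    omega

theorem canGetKHouses_changed : Claim_changed_canGetKHouses := by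
  unfold Claim_changed_canGetKHouses
  refine ⟨by decide, by decide, ?_, ?_, by decide⟩
  · show canGetKHouses [5] 0 3 = false
    rw [a_eq, gCount_eq_zero 3 [5] (by intro v hv; simp at hv; omega)]
    simp
  · show canGetKHouses_alt [5] 0 3 = true
    rw [alt_eq, gCount_eq_zero 3 [5] (by intro v hv; simp at hv; omega)]
    simp

theorem canGetKHouses_tight : Claim_exact_canGetKHouses := by
  intro nums k maxCap _ hd
  rcases hd with ⟨hk, hall⟩
  rw [a_eq, alt_eq, gCount_eq_zero maxCap nums hall]
  simp; omega
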